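-- pv_equiv track=rewrite | github.com/lethain/accounting | accounting/utils.py | leftpad_table
-- ===== SOURCE A (Python) =====
-- def leftpad_table(title, rows, offset=3):
--     acc = ''
--     longest_by_col = [0] * len(rows[0])
--     for row in rows:
--         for i, col in enumerate(row):
--             len_col = len(col)
--             if len_col > longest_by_col[i]:
--                 longest_by_col[i] = len_col
--
--     acc = title
--     for row in rows:
--         acc += '\n'
--         for i, col in enumerate(row):
--             target_len = longest_by_col[i] + offset
--             acc += (" " * (target_len - len(col))) + col
--
--     return acc
-- ===== SOURCE B (Python) =====
-- def leftpad_table(title, rows, offset=3):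
--     # One divide-and-conquer traversal of the rows ("repmin" pattern): each call
--     # returns the column maxima of its half together with a rendering function of
--     # the final widths; widths of halves are merged elementwise and the renderers
--     # concatenated, so there is no second scan over the rows and no mutable state.
--     n = len(rows[0])
--     def walk(lo, hi):
--         if hi - lo == 1:
--             row = rows[lo]
--             return ([len(c) for c in row] + [0] * (n - len(row)),
--                     lambda F: '\n' + ''.join(
--                         ' ' * (F[i] + offset - len(c)) + c for i, c in enumerate(row)))
--         mid = (lo + hi) // 2
--         wl, fl = walk(lo, mid)
--         wr, fr = walk(mid, hi)
--         return ([a if a > b else b for a, b in zip(wl, wr)],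
--                 lambda F: fl(F) + fr(F))
--     w, f = walk(0, len(rows))
--     return title + f(w)
-- ===== Notes on version B (the rewrite author's own statement) =====
-- stated objective: alternative
-- what changed: A's two sequential row scans (running-max mutation of a widths array, then += concatenation) are replaced by a single divide-and-conquer traversal that returns each half's column maxima together with a rendering closure of the final widths (repmin pattern), merging widths elementwise and concatenating the renderers.
import Mathlib
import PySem

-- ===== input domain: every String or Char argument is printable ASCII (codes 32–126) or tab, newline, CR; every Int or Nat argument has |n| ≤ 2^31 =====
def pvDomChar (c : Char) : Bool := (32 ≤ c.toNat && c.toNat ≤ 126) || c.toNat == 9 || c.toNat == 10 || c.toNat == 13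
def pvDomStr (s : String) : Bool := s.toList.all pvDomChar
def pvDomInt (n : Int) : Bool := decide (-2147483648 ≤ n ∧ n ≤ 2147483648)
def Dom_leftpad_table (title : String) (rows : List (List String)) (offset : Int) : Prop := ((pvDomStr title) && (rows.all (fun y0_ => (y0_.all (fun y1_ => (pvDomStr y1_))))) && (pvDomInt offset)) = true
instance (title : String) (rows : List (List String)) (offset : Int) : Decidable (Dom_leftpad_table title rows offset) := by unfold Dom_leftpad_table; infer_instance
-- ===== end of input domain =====

-- B replaces A's two sequential row scans (running-max array mutation, then += concatenation)
-- by a single divide-and-conquer traversal returning each half's column maxima together with a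
-- rendering closure of the final widths (repmin pattern); objective: alternative.

-- ===== PORT A =====
-- Strings are handled as their List Char contents (String.mk at the end); " " * k is
-- List.replicate k.toNat ' ' (exact: Python's negative repetition gives '').
def leftpad_table (title : String) (rows : List (List String)) (offset : Int) : String :=
  -- longest_by_col = [0] * len(rows[0]); rows[0] raises IndexError on rows = [] (outside Pre_)
  let longest0 : List Int := List.replicate (rows.headD []).length 0
  -- first loop: running max per column; longest_by_col[i] raises for i past rows[0] (outside Pre_)
  let longest : List Int := rows.foldl (fun L row =>
    (PySem.List.enumerate row).foldl (fun L ic =>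
      let lenCol : Int := PySem.Str.len ic.2
      if lenCol > PySem.List.pyGetD L ic.1 0 then PySem.List.pySetD L ic.1 lenCol else L) L) longest0
  -- second loop: acc = title; acc += '\n'; acc += (" " * (target_len - len(col))) + col
  String.mk (rows.foldl (fun acc row =>
    (PySem.List.enumerate row).foldl (fun acc ic =>
      let targetLen : Int := PySem.List.pyGetD longest ic.1 0 + offset
      acc ++ (List.replicate (targetLen - PySem.Str.len ic.2).toNat ' ' ++ ic.2.toList))
      (acc ++ ['\n'])) title.toList)

-- ===== PORT B =====
-- base case's width vector: [len(c) for c in row] + [0] * (n - len(row))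
def pvPerRow (n : Nat) (row : List String) : List Int :=
  row.map PySem.Str.len ++ List.replicate (n - row.length) 0

-- [a if a > b else b for a, b in zip(wl, wr)]
def pvZipMax (a b : List Int) : List Int :=
  (a.zip b).map (fun p => if p.1 > p.2 then p.1 else p.2)

-- base case's rendering closure:
-- lambda F: '\n' + ''.join(' ' * (F[i] + offset - len(c)) + c for i, c in enumerate(row));
-- F[i] is ported as pyGetD (exact under Pre_, where i < len(F) always holds)
def pvLine (offset : Int) (row : List String) (F : List Int) : List Char :=
  '\n' :: ((PySem.List.enumerate row).map (fun ic =>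
    List.replicate ((PySem.List.pyGetD F ic.1 0 + offset) - PySem.Str.len ic.2).toNat ' '
      ++ ic.2.toList)).flatten

-- def walk(lo, hi): single divide-and-conquer pass returning (widths, renderer).
-- Python tests 'hi - lo == 1'; on hi ≤ lo Python never returns (unreachable from any
-- returning run: rows = [] already raised at len(rows[0])), so that arm's value is free
-- and we fold it into the base case.
def pvWalk (rows : List (List String)) (n : Nat) (offset : Int) (lo hi : Nat) :
    List Int × (List Int → List Char) :=
  if 1 < hi - lo then
    (pvZipMax (pvWalk rows n offset lo ((lo + hi) / 2)).1 (pvWalk rows n offset ((lo + hi) / 2) hi).1,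
     fun F => (pvWalk rows n offset lo ((lo + hi) / 2)).2 F ++ (pvWalk rows n offset ((lo + hi) / 2) hi).2 F)
  else
    (pvPerRow n (rows.getD lo []), pvLine offset (rows.getD lo []))
termination_by hi - lo
decreasing_by all_goals omega

def leftpad_table_alt (title : String) (rows : List (List String)) (offset : Int) : String :=
  let n : Nat := (rows.headD []).length
  let wf := pvWalk rows n offset 0 rows.length
  String.mk (title.toList ++ wf.2 wf.1)

-- ===== PRECONDITION & SPEC =====
-- Pre_ excludes exactly the inputs where the Python A raises IndexError: empty rows
-- (rows[0]) and ragged input with a row longer than rows[0] (longest_by_col[i]).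
def Pre_leftpad_table (title : String) (rows : List (List String)) (offset : Int) : Prop :=
  rows ≠ [] ∧ ∀ r ∈ rows, r.length ≤ (rows.headD []).length
instance (title : String) (rows : List (List String)) (offset : Int) : Decidable (Pre_leftpad_table title rows offset) := by unfold Pre_leftpad_table; infer_instance
def pvWitness_leftpad_table : String × List (List String) × Int := ("T", [["ab", "c"], ["d", "ef"]], 3)

def Spec_leftpad_table (title : String) (rows : List (List String)) (offset : Int) (out : String) : Prop := out = leftpad_table_alt title rows offset
instance (title : String) (rows : List (List String)) (offset : Int) (out : String) : Decidable (Spec_leftpad_table title rows offset out) := by unfold Spec_leftpad_table; infer_instance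

-- ===== CLAIM (what is proved, stated in full; the proofs are below) =====
def Claim_equal_leftpad_table : Prop := ∀ (title : String) (rows : List (List String)) (offset : Int), Dom_leftpad_table title rows offset → Pre_leftpad_table title rows offset → Spec_leftpad_table title rows offset (leftpad_table title rows offset)

-- ===== LEMMAS AND PROOFS =====

-- ---- A-side characterisation (widths as a pointwise running max) ----

-- the widths-update step of A's first loop (the port's inner lambda, lets reduced)
def pvWStep (L : List Int) (ic : Int × String) : List Int :=
  if PySem.Str.len ic.2 > PySem.List.pyGetD L ic.1 0 then PySem.List.pySetD L ic.1 (PySem.Str.len ic.2) else L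

theorem pvWStep_length (L : List Int) (ic : Int × String) : (pvWStep L ic).length = L.length := by
  unfold pvWStep
  split
  · exact PySem.List.length_pySetD _ _ _
  · rfl

theorem pvInner_length (row : List String) (s : Int) (L : List Int) :
    ((PySem.List.enumerate row s).foldl pvWStep L).length = L.length := by
  induction row generalizing s L with
  | nil => simp [PySem.List.enumerate_nil]
  | cons c cs ih => simp [PySem.List.enumerate_cons, List.foldl_cons, ih, pvWStep_length]

theorem pvWStep_getD (L : List Int) (s : Nat) (c : String) (j : Nat) :
    (pvWStep L ((s : Int), c)).getD j 0 =
      if j = s ∧ j < L.length then max (L.getD j 0) (PySem.Str.len c) else L.getD j 0 := by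
  unfold pvWStep
  simp only [PySem.List.pyGetD_natCast, PySem.List.pySetD_natCast]
  by_cases hgt : PySem.Str.len c > L.getD s 0
  · rw [if_pos hgt]
    by_cases hjs : j = s
    · subst hjs
      by_cases hjl : j < L.length
      · rw [if_pos ⟨rfl, hjl⟩]
        rw [List.getD_eq_getElem?_getD] at hgt
        simp [List.getD_eq_getElem?_getD, hjl, List.getElem?_eq_getElem] at hgt ⊢
        omega
      · rw [if_neg (fun h => hjl h.2)]
        simp [List.getD_eq_getElem?_getD, hjl]
    · rw [if_neg (fun h => hjs h.1), List.getD_eq_getElem?_getD, List.getD_eq_getElem?_getD,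
          List.getElem?_set, if_neg (fun h => hjs h.symm)]
  · rw [if_neg hgt]
    by_cases hjs : j = s ∧ j < L.length
    · obtain ⟨rfl, hjl⟩ := hjs
      rw [if_pos ⟨rfl, hjl⟩]
      omega
    · rw [if_neg hjs]

theorem pvInner_getD (row : List String) (s : Nat) (L : List Int) (i : Nat) :
    ((PySem.List.enumerate row (s : Int)).foldl pvWStep L).getD i 0 =
      if s ≤ i ∧ i < s + row.length ∧ i < L.length then
        max (L.getD i 0) (PySem.Str.len (row.getD (i - s) "")) else L.getD i 0 := by
  induction row generalizing s L with
  | nil =>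
    rw [PySem.List.enumerate_nil, List.foldl_nil, if_neg (by simp; omega)]
  | cons c cs ih =>
    rw [PySem.List.enumerate_cons, List.foldl_cons]
    have hcast : ((s : Int) + 1) = ((s + 1 : Nat) : Int) := by push_cast; ring
    rw [hcast, ih]
    have hlen : (pvWStep L ((s : Int), c)).length = L.length := pvWStep_length _ _
    rw [hlen]
    by_cases hmain : s ≤ i ∧ i < s + (c :: cs).length ∧ i < L.length
    · obtain ⟨h1, h2, h3⟩ := hmain
      simp only [List.length_cons] at h2
      by_cases hi : i = s
      · subst hi
        rw [if_neg (by omega), pvWStep_getD, if_pos ⟨rfl, h3⟩,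
            if_pos ⟨le_refl _, by simp, h3⟩]
        simp
      · rw [if_pos ⟨by omega, by omega, h3⟩, if_pos ⟨h1, by simp; omega, h3⟩,
            pvWStep_getD, if_neg (by omega)]
        have hidx : i - s = (i - (s + 1)) + 1 := by omega
        rw [hidx]
        simp
    · simp only [List.length_cons] at hmain
      rw [if_neg (by omega), if_neg (by simpa using hmain), pvWStep_getD,
          if_neg (by omega)]

-- A's whole first loop, pointwise: a running max down the column
theorem pvOuter_getD (rows : List (List String)) (L : List Int) (i : Nat)
    (hi : i < L.length) (hr : ∀ r ∈ rows, r.length ≤ L.length) :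
    ((rows.foldl (fun L row => (PySem.List.enumerate row).foldl pvWStep L) L).getD i 0) =
      rows.foldl (fun m r => if i < r.length then max m (PySem.Str.len (r.getD i "")) else m) (L.getD i 0) := by
  induction rows generalizing L with
  | nil => simp
  | cons r rs ih =>
    simp only [List.foldl_cons]
    have hlen : ((PySem.List.enumerate r).foldl pvWStep L).length = L.length := pvInner_length _ _ _
    rw [ih _ (by omega) (fun r' hr' => by rw [hlen]; exact hr r' (List.mem_cons_of_mem _ hr'))]
    have h0 : (PySem.List.enumerate r) = (PySem.List.enumerate r ((0 : Nat) : Int)) := by norm_num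
    rw [h0, pvInner_getD]
    by_cases hir : i < r.length
    · rw [if_pos ⟨by omega, by omega, hi⟩, if_pos hir]
      simp
    · rw [if_neg (by omega), if_neg hir]

theorem pvOuterLen (rs : List (List String)) (L : List Int) :
    (rs.foldl (fun L row => (PySem.List.enumerate row).foldl pvWStep L) L).length = L.length := by
  induction rs generalizing L with
  | nil => rfl
  | cons r rs ih => rw [List.foldl_cons, ih, pvInner_length]

-- a fold that appends f x for every element is an append of the flattened map
theorem pvFoldlAppend {α : Type} (f : α → List Char) (l : List α) (s : List Char) :
    l.foldl (fun a x => a ++ f x) s = s ++ (l.map f).flatten := by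
  induction l generalizing s with
  | nil => simp
  | cons x xs ih => simp [ih, List.append_assoc]

-- ---- B-side characterisation: pvWalk over a segment ----

theorem pvStrLen_nonneg (s : String) : 0 ≤ PySem.Str.len s := by
  simp [PySem.Str.len_eq]

theorem pvZipMax_eq_zipWith (a b : List Int) : pvZipMax a b = List.zipWith max a b := by
  unfold pvZipMax
  induction a generalizing b with
  | nil => simp
  | cons x xs ih =>
    cases b with
    | nil => simp
    | cons y ys =>
      simp only [List.zip_cons_cons, List.map_cons, List.zipWith_cons_cons, ih]
      congr 1
      rw [max_def]
      split_ifs <;> omega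

theorem pvZipMax_assoc (a b c : List Int) :
    pvZipMax (pvZipMax a b) c = pvZipMax a (pvZipMax b c) := by
  simp only [pvZipMax_eq_zipWith]
  induction a generalizing b c with
  | nil => simp
  | cons x xs ih =>
    cases b with
    | nil => simp
    | cons y ys =>
      cases c with
      | nil => simp
      | cons z zs => simp [ih, max_assoc]

-- nonempty-fold of pvZipMax (the value the divide-and-conquer merge computes)
def pvNMax : List (List Int) → List Int
  | [] => []
  | a :: t => t.foldl pvZipMax a

theorem pvFoldl_zipMax_pull (l : List (List Int)) (x y : List Int) :
    pvZipMax x (l.foldl pvZipMax y) = l.foldl pvZipMax (pvZipMax x y) := by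
  induction l generalizing y with
  | nil => rfl
  | cons z zs ih => rw [List.foldl_cons, List.foldl_cons, ih, pvZipMax_assoc]

theorem pvNMax_append (xs ys : List (List Int)) (hx : xs ≠ []) (hy : ys ≠ []) :
    pvNMax (xs ++ ys) = pvZipMax (pvNMax xs) (pvNMax ys) := by
  cases xs with
  | nil => exact absurd rfl hx
  | cons a t =>
    cases ys with
    | nil => exact absurd rfl hy
    | cons b u =>
      show (t ++ b :: u).foldl pvZipMax a = _
      rw [List.foldl_append, List.foldl_cons, pvNMax, pvNMax, ← pvFoldl_zipMax_pull]

-- the segment of rows a (lo, hi) call is about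
def pvSeg (rows : List (List String)) (lo hi : Nat) : List (List String) :=
  (rows.drop lo).take (hi - lo)

theorem pvSeg_one (rows : List (List String)) (lo : Nat) (h : lo < rows.length) :
    pvSeg rows lo (lo + 1) = [rows.getD lo []] := by
  unfold pvSeg
  rw [Nat.add_sub_cancel_left]
  rw [List.getD_eq_getElem?_getD, List.getElem?_eq_getElem h]
  rw [List.take_one, List.head?_drop, List.getElem?_eq_getElem h]
  rfl

theorem pvSeg_split (rows : List (List String)) (lo mid hi : Nat)
    (h1 : lo ≤ mid) (h2 : mid ≤ hi) :
    pvSeg rows lo hi = pvSeg rows lo mid ++ pvSeg rows mid hi := by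
  unfold pvSeg
  have h3 : hi - lo = (mid - lo) + (hi - mid) := by omega
  rw [h3, List.take_add, List.drop_drop]
  have h4 : lo + (mid - lo) = mid := by omega
  rw [h4]

theorem pvSeg_ne_nil (rows : List (List String)) (lo hi : Nat)
    (h1 : lo < hi) (h2 : hi ≤ rows.length) : pvSeg rows lo hi ≠ [] := by
  unfold pvSeg
  intro hcon
  have := congrArg List.length hcon
  simp at this
  omega

-- pvWalk computes: the zipMax-fold of the segment's per-row widths, and a renderer that
-- flattens the per-row lines
theorem pvWalk_spec (rows : List (List String)) (n : Nat) (offset : Int) :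
    ∀ (k lo hi : Nat), hi - lo = k → lo < hi → hi ≤ rows.length →
      pvWalk rows n offset lo hi =
        (pvNMax ((pvSeg rows lo hi).map (pvPerRow n)),
         fun F => ((pvSeg rows lo hi).map (fun row => pvLine offset row F)).flatten) := by
  intro k
  induction k using Nat.strong_induction_on with
  | _ k ih =>
    intro lo hi hk hlh hhr
    rw [pvWalk]
    by_cases h : 1 < hi - lo
    · rw [if_pos h]
      have hmid1 : lo < (lo + hi) / 2 := by omega
      have hmid2 : (lo + hi) / 2 < hi := by omega
      rw [ih ((lo + hi) / 2 - lo) (by omega) lo ((lo + hi) / 2) rfl hmid1 (by omega),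
          ih (hi - (lo + hi) / 2) (by omega) ((lo + hi) / 2) hi rfl hmid2 hhr]
      rw [pvSeg_split rows lo ((lo + hi) / 2) hi (by omega) (by omega)]
      rw [List.map_append, pvNMax_append _ _
        (by simp only [ne_eq, List.map_eq_nil_iff]; exact pvSeg_ne_nil rows lo _ hmid1 (by omega))
        (by simp only [ne_eq, List.map_eq_nil_iff]; exact pvSeg_ne_nil rows _ hi hmid2 hhr)]
      refine congrArg₂ Prod.mk rfl ?_
      funext F
      rw [List.map_append, List.flatten_append]
    · rw [if_neg h]
      have hone : hi = lo + 1 := by omega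
      subst hone
      rw [pvSeg_one rows lo (by omega)]
      refine congrArg₂ Prod.mk rfl ?_
      funext F
      simp [pvNMax]

-- pointwise value of the per-row width vector
theorem pvPerRow_getD (n : Nat) (r : List String) (i : Nat) :
    (pvPerRow n r).getD i 0 = if i < r.length then PySem.Str.len (r.getD i "") else 0 := by
  unfold pvPerRow
  by_cases h : i < r.length
  · rw [if_pos h]
    rw [List.getD_eq_getElem?_getD, List.getElem?_append_left (by simpa using h)]
    simp [List.getElem?_eq_getElem, h, List.getD_eq_getElem?_getD]
  · rw [if_neg h]
    rw [List.getD_eq_getElem?_getD, List.getElem?_append_right (by simpa using h)]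
    simp only [List.length_map, List.getElem?_replicate]
    split <;> rfl

theorem pvPerRow_length (n : Nat) (r : List String) (h : r.length ≤ n) :
    (pvPerRow n r).length = n := by
  unfold pvPerRow
  simp
  omega

theorem pvZipMax_length (a b : List Int) :
    (pvZipMax a b).length = min a.length b.length := by
  rw [pvZipMax_eq_zipWith, List.length_zipWith]

theorem pvZipMax_getD (a b : List Int) (i : Nat) (ha : i < a.length) (hb : i < b.length) :
    (pvZipMax a b).getD i 0 = max (a.getD i 0) (b.getD i 0) := by
  rw [pvZipMax_eq_zipWith]
  rw [List.getD_eq_getElem?_getD, List.getD_eq_getElem?_getD, List.getD_eq_getElem?_getD]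
  rw [List.getElem?_zipWith, List.getElem?_eq_getElem ha, List.getElem?_eq_getElem hb]
  simp

-- the zipMax-fold of the per-row vectors, pointwise: the same running max as A's loop
theorem pvNMax_fold_length (l : List (List Int)) (a : List Int)
    (hl : ∀ w ∈ l, w.length = a.length) : (l.foldl pvZipMax a).length = a.length := by
  induction l generalizing a with
  | nil => rfl
  | cons w ws ih =>
    rw [List.foldl_cons, ih]
    · rw [pvZipMax_length, hl w List.mem_cons_self]
      omega
    · intro w' hw'
      rw [pvZipMax_length, hl w List.mem_cons_self, hl w' (List.mem_cons_of_mem _ hw')]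
      omega

theorem pvNMax_fold_getD (rs : List (List String)) (n : Nat) (a : List Int) (i : Nat)
    (ha : a.length = n) (hi : i < n) (hrs : ∀ r ∈ rs, r.length ≤ n) (h0 : 0 ≤ a.getD i 0) :
    ((rs.map (pvPerRow n)).foldl pvZipMax a).getD i 0 =
      rs.foldl (fun m r => if i < r.length then max m (PySem.Str.len (r.getD i "")) else m) (a.getD i 0) := by
  induction rs generalizing a with
  | nil => rfl
  | cons r rest ih =>
    rw [List.map_cons, List.foldl_cons, List.foldl_cons]
    have hrlen : (pvPerRow n r).length = n := pvPerRow_length n r (hrs r List.mem_cons_self)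
    have hzlen : (pvZipMax a (pvPerRow n r)).length = n := by
      rw [pvZipMax_length, ha, hrlen]; omega
    have hzget : (pvZipMax a (pvPerRow n r)).getD i 0 =
        if i < r.length then max (a.getD i 0) (PySem.Str.len (r.getD i "")) else a.getD i 0 := by
      rw [pvZipMax_getD a _ i (by omega) (by omega), pvPerRow_getD]
      split_ifs
      · rfl
      · omega
    rw [ih _ hzlen (fun r' hr' => hrs r' (List.mem_cons_of_mem _ hr')) (by
          rw [hzget]
          split_ifs
          · have := pvStrLen_nonneg (r.getD i "")
            omega
          · exact h0), hzget]

-- A's widths and B's widths agree under Pre_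
theorem pvWidths_eq (rows : List (List String)) (hne : rows ≠ [])
    (hr : ∀ r ∈ rows, r.length ≤ (rows.headD []).length) :
    (rows.foldl (fun L row => (PySem.List.enumerate row).foldl pvWStep L)
        (List.replicate (rows.headD []).length 0)) =
      pvNMax (rows.map (pvPerRow (rows.headD []).length)) := by
  set n := (rows.headD []).length with hn
  cases rows with
  | nil => exact absurd rfl hne
  | cons r0 rest =>
    have hr0 : r0.length ≤ n := hr r0 List.mem_cons_self
    have hrest : ∀ r ∈ rest, r.length ≤ n := fun r h => hr r (List.mem_cons_of_mem _ h)
    apply List.ext_getElem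
    · rw [pvOuterLen]
      show (List.replicate n (0 : Int)).length = (pvNMax _).length
      rw [List.length_replicate, List.map_cons]
      show n = ((rest.map (pvPerRow n)).foldl pvZipMax (pvPerRow n r0)).length
      rw [pvNMax_fold_length]
      · rw [pvPerRow_length n r0 hr0]
      · intro w hw
        rw [pvPerRow_length n r0 hr0]
        obtain ⟨r, hrmem, rfl⟩ := List.mem_map.mp hw
        exact pvPerRow_length n r (hrest r hrmem)
    · intro i h1 h2
      have hin : i < n := by rw [pvOuterLen] at h1; simpa using h1
      -- A side
      have hA := pvOuter_getD (r0 :: rest) (List.replicate n 0) i (by simpa using hin)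
        (fun r hrr => by simpa using hr r hrr)
      rw [List.getD_eq_getElem?_getD, List.getElem?_eq_getElem h1, Option.getD_some] at hA
      have hz : (List.replicate n (0 : Int)).getD i 0 = 0 := by
        simp [List.getD_eq_getElem?_getD, hin]
      rw [hz] at hA
      -- B side
      have hB : (pvNMax ((r0 :: rest).map (pvPerRow n))).getD i 0 =
          rest.foldl (fun m r => if i < r.length then max m (PySem.Str.len (r.getD i "")) else m)
            ((pvPerRow n r0).getD i 0) := by
        rw [List.map_cons]
        exact pvNMax_fold_getD rest n (pvPerRow n r0) i (pvPerRow_length n r0 hr0) hin hrest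
          (by rw [pvPerRow_getD]; split_ifs with hh; exacts [pvStrLen_nonneg _, le_refl 0])
      rw [List.getD_eq_getElem?_getD, List.getElem?_eq_getElem h2, Option.getD_some] at hB
      rw [hA, hB, List.foldl_cons]
      congr 1
      rw [pvPerRow_getD]
      split_ifs with h
      · have := pvStrLen_nonneg (r0.getD i "")
        omega
      · rfl

-- ===== VERDICT (by name: the statement is the Claim_ definition above) =====
theorem leftpad_table_spec : Claim_equal_leftpad_table := by
  intro title rows offset _ hpre
  obtain ⟨hne, hr⟩ := hpre
  unfold Spec_leftpad_table leftpad_table leftpad_table_alt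
  simp only []
  have hlen : 0 < rows.length := List.length_pos_iff.mpr hne
  rw [pvWalk_spec rows (rows.headD []).length offset rows.length 0 rows.length rfl hlen le_rfl]
  have hseg : pvSeg rows 0 rows.length = rows := by
    unfold pvSeg
    simp
  rw [hseg]
  have hw := pvWidths_eq rows hne hr
  set W := pvNMax (rows.map (pvPerRow (rows.headD []).length)) with hW
  -- rewrite A's first loop to W
  have hfold : rows.foldl (fun L row =>
      (PySem.List.enumerate row).foldl (fun L ic =>
        if PySem.Str.len ic.2 > PySem.List.pyGetD L ic.1 0
        then PySem.List.pySetD L ic.1 (PySem.Str.len ic.2) else L) L)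
      (List.replicate (rows.headD []).length 0) = W := by
    rw [← hw]
    rfl
  rw [hfold]
  -- A's second loop = title ++ flatten of per-row lines
  congr 1
  have hrow : ∀ (acc : List Char) (row : List String),
      (PySem.List.enumerate row).foldl (fun acc ic =>
          acc ++ (List.replicate ((PySem.List.pyGetD W ic.1 0 + offset) - PySem.Str.len ic.2).toNat ' ' ++ ic.2.toList))
        (acc ++ ['\n'])
      = acc ++ pvLine offset row W := by
    intro acc row
    rw [pvFoldlAppend, List.append_assoc, List.singleton_append]
    rfl
  rw [show (fun (acc : List Char) (row : List String) =>
        (PySem.List.enumerate row).foldl (fun acc ic =>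
          acc ++ (List.replicate ((PySem.List.pyGetD W ic.1 0 + offset) - PySem.Str.len ic.2).toNat ' ' ++ ic.2.toList))
        (acc ++ ['\n']))
      = (fun (acc : List Char) (row : List String) => acc ++ pvLine offset row W) from funext₂ hrow]
  rw [pvFoldlAppend]
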